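-- pv_equiv track=rewrite | github.com/wggraham/interview-prep | interviewbit/Stacks&Queues/hotel-service.py | nearestHotel2
-- ===== SOURCE A (Python) =====
-- from collections import deque
--
-- def nearestHotel2(A, B):
--     n = len(A)
--     m = len(A[0])
--     inf = 1 << 30
--     dis = [[0 for _ in range(1005)] for _ in range(1005)]
--     q = deque()
--     for i in range(n):
--         for j in range(m):
--             if A[i][j] == 0:
--                 dis[i + 1][j + 1] = inf
--             else:
--                 dis[i + 1][j + 1] = 0
--                 q.append([i + 1, j + 1])
--
--     while len(q) > 0:
--         curr = q[0]
--         q.popleft()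
--         x = curr[0]
--         y = curr[1]
--         if dis[x][y + 1] == inf:
--             dis[x][y + 1] = dis[x][y] + 1
--             q.append([x, y + 1])
--
--         if dis[x][y - 1] == inf:
--             dis[x][y - 1] = dis[x][y] + 1
--             q.append([x, y - 1])
--
--         if dis[x + 1][y] == inf:
--             dis[x + 1][y] = dis[x][y] + 1
--             q.append([x + 1, y])
--
--         if dis[x - 1][y] == inf:
--             dis[x - 1][y] = dis[x][y] + 1
--             q.append([x - 1, y])
--
--     ans = []
--     for i in range(len(B)):
--         ans.append(dis[B[i][0]][B[i][1]])
--
--     return ans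
-- ===== SOURCE B (Python) =====
-- def nearestHotel2(A, B):
--     # Nearest hotel by Manhattan distance (the grid has no obstacles, so BFS
--     # distance = Manhattan distance to the nearest hotel); same padded table.
--     n = len(A)
--     m = len(A[0])
--     inf = 1 << 30
--     hotels = [(i, j) for i in range(n) for j in range(m) if A[i][j] != 0]
--     dis = [[0] * 1005 for _ in range(1005)]
--     for i in range(n):
--         for j in range(m):
--             best = inf
--             for (x, y) in hotels:
--                 d = abs(i - x) + abs(j - y)
--                 if d < best:
--                     best = d
--             dis[i + 1][j + 1] = best
--     return [dis[b[0]][b[1]] for b in B]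
-- ===== Notes on version B (the rewrite author's own statement) =====
-- stated objective: simpler
-- what changed: Replaces the multi-source BFS with a queue over the padded table by a direct computation: since the grid has no obstacles, the BFS distance equals the Manhattan distance to the nearest hotel, so B collects the hotel cells once and fills each grid cell of the same padded table with the minimum Manhattan distance (inf = 1<<30 when there is no hotel), answering queries by the same table lookup.
import Mathlib
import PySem

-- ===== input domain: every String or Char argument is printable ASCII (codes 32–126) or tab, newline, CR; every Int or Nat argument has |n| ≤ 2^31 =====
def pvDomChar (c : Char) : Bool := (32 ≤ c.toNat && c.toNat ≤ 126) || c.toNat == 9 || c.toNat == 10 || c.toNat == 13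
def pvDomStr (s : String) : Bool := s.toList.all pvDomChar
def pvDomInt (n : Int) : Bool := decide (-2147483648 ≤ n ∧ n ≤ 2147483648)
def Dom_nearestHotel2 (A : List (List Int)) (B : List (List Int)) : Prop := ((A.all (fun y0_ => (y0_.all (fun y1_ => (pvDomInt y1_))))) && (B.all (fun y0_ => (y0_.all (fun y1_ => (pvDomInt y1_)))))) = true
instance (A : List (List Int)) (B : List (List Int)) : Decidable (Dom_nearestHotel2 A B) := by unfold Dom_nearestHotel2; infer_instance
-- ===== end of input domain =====

-- B replaces the queue-based multi-source BFS by a direct nearest-hotel Manhattan-distance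
-- computation over the same padded table (simpler; the grid has no obstacles).


-- ===== PORT A =====
-- shared small helpers (Python primitives): the fixed `inf`, functional 2D table update,
-- Python list indexing of the fixed 1005-long padded rows (negative indices count from the
-- end; exact for indices in [-1005, 1004], which Pre_ guarantees), A[i][j] and q[k] reads.
def pvInf : Int := 1073741824

def pvSet (f : Int → Int → Int) (x y v : Int) : Int → Int → Int :=
  fun a b => if a = x ∧ b = y then v else f a b

def pvWrap (i : Int) : Int := if i < 0 then i + 1005 else i

def pvAij (A : List (List Int)) (i j : Int) : Int :=
  PySem.List.pyGetD ((PySem.List.pyGet? A i).getD []) j 0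

def pvQk (q : List Int) (k : Int) : Int := PySem.List.pyGetD q k 0

-- the four neighbours, in exactly the order A's BFS body tests them
def pvNbrs (c : Int × Int) : List (Int × Int) :=
  [(c.1, c.2 + 1), (c.1, c.2 - 1), (c.1 + 1, c.2), (c.1 - 1, c.2)]

-- one `if dis[nb] == inf: dis[nb] = dis[curr] + 1; q.append(nb)` step of A's loop body
def pvRelax (curr : Int × Int) (s : (Int → Int → Int) × List (Int × Int)) (nb : Int × Int) :
    (Int → Int → Int) × List (Int × Int) :=
  if s.1 nb.1 nb.2 = pvInf then (pvSet s.1 nb.1 nb.2 (s.1 curr.1 curr.2 + 1), s.2 ++ [nb]) else s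

-- A's `while len(q) > 0` loop; fuel only makes it total (under Pre_ it never runs out:
-- each iteration pops one cell and every append turns one in-block `inf` cell non-inf)
def pvBfs : Nat → (Int → Int → Int) → List (Int × Int) → (Int → Int → Int)
  | 0, dis, _ => dis
  | _ + 1, dis, [] => dis
  | fuel + 1, dis, c :: rest =>
      let s := (pvNbrs c).foldl (pvRelax c) (dis, rest)
      pvBfs fuel s.1 s.2

-- A's initialisation double loop (table starts all-zero like `[[0]*1005 …]`)
def pvInitA (A : List (List Int)) (n m : Int) : (Int → Int → Int) × List (Int × Int) :=
  (PySem.List.pyRange 0 n 1).foldl (fun s i =>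
    (PySem.List.pyRange 0 m 1).foldl (fun s j =>
      if pvAij A i j = 0 then (pvSet s.1 (i + 1) (j + 1) pvInf, s.2)
      else (pvSet s.1 (i + 1) (j + 1) 0, s.2 ++ [(i + 1, j + 1)])) s)
    ((fun _ _ => 0), [])

def nearestHotel2 (A : List (List Int)) (B : List (List Int)) : List Int :=
  let n : Int := A.length
  let m : Int := ((PySem.List.pyGet? A 0).getD []).length
  let s := pvInitA A n m
  let dis := pvBfs (2 * n.toNat * m.toNat + 1) s.1 s.2
  B.foldl (fun ans q => ans ++ [dis (pvWrap (pvQk q 0)) (pvWrap (pvQk q 1))]) []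

-- ===== PORT B =====
-- Source B's table-filling double loop: write v i j into cell (i+1, j+1) for all i < n, j < m
def pvTabF (v : Int → Int → Int) (n m : Int) (f : Int → Int → Int) : Int → Int → Int :=
  (PySem.List.pyRange 0 n 1).foldl (fun f i =>
    (PySem.List.pyRange 0 m 1).foldl (fun f j => pvSet f (i + 1) (j + 1) (v i j)) f) f

-- hotel-cell comprehension of Source B
def pvHotels (A : List (List Int)) (n m : Int) : List (Int × Int) :=
  (PySem.List.pyRange 0 n 1).foldl (fun hs i =>
    (PySem.List.pyRange 0 m 1).foldl (fun hs j =>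
      if pvAij A i j ≠ 0 then hs ++ [(i, j)] else hs) hs) []

-- Source B's inner `best` loop: minimum Manhattan distance to a hotel, inf if none
def pvBest (hotels : List (Int × Int)) (i j : Int) : Int :=
  hotels.foldl (fun best h =>
    let d : Int := (((i - h.1).natAbs + (j - h.2).natAbs : Nat) : Int)
    if d < best then d else best) pvInf

def nearestHotel2_alt (A : List (List Int)) (B : List (List Int)) : List Int :=
  let n : Int := A.length
  let m : Int := ((PySem.List.pyGet? A 0).getD []).length
  let hotels := pvHotels A n m
  let dis := pvTabF (fun i j => pvBest hotels i j) n m (fun _ _ => 0)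
  B.map (fun q => dis (pvWrap (pvQk q 0)) (pvWrap (pvQk q 1)))

-- ===== PRECONDITION & SPEC =====
-- Exactly where Python A returns: A nonempty (A[0]); every row at least as long as the
-- first (A[i][j]); the grid fits the fixed 1005-padded table, and when n or m is exactly
-- 1004 there must be no hotel (otherwise BFS reads dis[1005][...] — IndexError); every
-- query row has at least two entries whose values are valid indices into a 1005-long list.
def Pre_nearestHotel2 (A : List (List Int)) (B : List (List Int)) : Prop :=
  A ≠ [] ∧
  (∀ row ∈ A, (A.headD []).length ≤ row.length) ∧
  A.length ≤ 1004 ∧ (A.headD []).length ≤ 1004 ∧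
  ((A.length = 1004 ∨ (A.headD []).length = 1004) →
    ∀ row ∈ A, ∀ v ∈ row.take (A.headD []).length, v = 0) ∧
  (∀ q ∈ B, 2 ≤ q.length ∧
    -1005 ≤ PySem.List.pyGetD q 0 0 ∧ PySem.List.pyGetD q 0 0 < 1005 ∧
    -1005 ≤ PySem.List.pyGetD q 1 0 ∧ PySem.List.pyGetD q 1 0 < 1005)
instance (A : List (List Int)) (B : List (List Int)) : Decidable (Pre_nearestHotel2 A B) := by
  unfold Pre_nearestHotel2; infer_instance

def pvWitness_nearestHotel2 : List (List Int) × List (List Int) :=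
  ([[1, 0], [0, 0]], [[1, 2], [2, 2], [0, 7], [-3, 1]])

def Spec_nearestHotel2 (A : List (List Int)) (B : List (List Int)) (out : List Int) : Prop := out = nearestHotel2_alt A B
instance (A : List (List Int)) (B : List (List Int)) (out : List Int) : Decidable (Spec_nearestHotel2 A B out) := by unfold Spec_nearestHotel2; infer_instance

-- ===== CLAIM (what is proved, stated in full; the proofs are below) =====
def Claim_equal_nearestHotel2 : Prop := ∀ (A : List (List Int)) (B : List (List Int)), Dom_nearestHotel2 A B → Pre_nearestHotel2 A B → Spec_nearestHotel2 A B (nearestHotel2 A B)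

-- ===== LEMMAS AND PROOFS =====

-- grid block predicate (1-based), Manhattan distance, nearest-hotel distance
abbrev Blk (n m x y : Int) : Prop := 1 ≤ x ∧ x ≤ n ∧ 1 ≤ y ∧ y ≤ m

def pvDist (c h : Int × Int) : Int := ((c.1 - h.1).natAbs : Int) + ((c.2 - h.2).natAbs : Int)

def pvMd (H : List (Int × Int)) (x y : Int) : Int :=
  H.foldl (fun best h => min best (pvDist (x, y) h)) pvInf

theorem foldl_min_le_init (H : List (Int × Int)) (f : Int × Int → Int) (b : Int) :
    H.foldl (fun acc h => min acc (f h)) b ≤ b := by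
  induction H generalizing b with
  | nil => simp
  | cons h t ih => exact le_trans (ih _) (min_le_left _ _)

theorem foldl_min_le_mem (H : List (Int × Int)) (f : Int × Int → Int) (b : Int)
    (h : Int × Int) (hmem : h ∈ H) :
    H.foldl (fun acc x => min acc (f x)) b ≤ f h := by
  induction H generalizing b with
  | nil => simp at hmem
  | cons h0 t ih =>
    simp only [List.mem_cons] at hmem
    simp only [List.foldl_cons]
    rcases hmem with h1 | h1
    · subst h1; exact le_trans (foldl_min_le_init t f _) (min_le_right _ _)
    · exact ih _ h1

theorem foldl_min_cases (H : List (Int × Int)) (f : Int × Int → Int) (b : Int) :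
    H.foldl (fun acc x => min acc (f x)) b = b ∨ ∃ h ∈ H, H.foldl (fun acc x => min acc (f x)) b = f h := by
  induction H generalizing b with
  | nil => simp
  | cons h0 t ih =>
    simp only [List.foldl_cons]
    rcases ih (min b (f h0)) with h1 | ⟨h, hm, he⟩
    · rcases le_total b (f h0) with h2 | h2
      · left; simpa [min_eq_left h2] using h1
      · right; exact ⟨h0, by simp, by simpa [min_eq_right h2] using h1⟩
    · right; exact ⟨h, by simp [hm], he⟩

theorem le_foldl_min (H : List (Int × Int)) (f : Int × Int → Int) (b c : Int)
    (hb : c ≤ b) (hf : ∀ h ∈ H, c ≤ f h) :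
    c ≤ H.foldl (fun acc x => min acc (f x)) b := by
  induction H generalizing b with
  | nil => simpa
  | cons h0 t ih =>
    exact ih _ (le_min hb (hf h0 (by simp))) (fun h hm => hf h (by simp [hm]))

theorem pvMd_le_inf (H : List (Int × Int)) (x y : Int) : pvMd H x y ≤ pvInf :=
  foldl_min_le_init H _ _

theorem pvMd_le_dist (H : List (Int × Int)) (x y : Int) (h : Int × Int) (hm : h ∈ H) :
    pvMd H x y ≤ pvDist (x, y) h :=
  foldl_min_le_mem H _ _ h hm

theorem pvMd_cases (H : List (Int × Int)) (x y : Int) :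
    pvMd H x y = pvInf ∨ ∃ h ∈ H, pvMd H x y = pvDist (x, y) h :=
  foldl_min_cases H _ _

theorem pvMd_nonneg (H : List (Int × Int)) (x y : Int) : 0 ≤ pvMd H x y := by
  refine le_foldl_min H _ _ 0 (by norm_num [pvInf]) (fun h _ => ?_)
  unfold pvDist; positivity

theorem pvDist_triangle (c c' h : Int × Int) : pvDist c h ≤ pvDist c c' + pvDist c' h := by
  unfold pvDist; omega

theorem pvMd_lipschitz (H : List (Int × Int)) (x y x' y' : Int) :
    pvMd H x y ≤ pvMd H x' y' + pvDist (x, y) (x', y') := by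
  rcases pvMd_cases H x' y' with h1 | ⟨h, hm, he⟩
  · have := pvMd_le_inf H x y
    have h2 : (0:Int) ≤ pvDist (x, y) (x', y') := by unfold pvDist; positivity
    omega
  · calc pvMd H x y ≤ pvDist (x, y) h := pvMd_le_dist H x y h hm
      _ ≤ pvDist (x, y) (x', y') + pvDist (x', y') h := pvDist_triangle _ _ _
      _ = pvMd H x' y' + pvDist (x, y) (x', y') := by rw [he]; ring

theorem pvMd_hot (H : List (Int × Int)) (c : Int × Int) (hm : c ∈ H) :
    pvMd H c.1 c.2 = 0 := by
  have h1 := pvMd_le_dist H c.1 c.2 c hm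
  have h2 := pvMd_nonneg H c.1 c.2
  have : pvDist (c.1, c.2) c = 0 := by unfold pvDist; omega
  omega

theorem pvMd_zero_mem (H : List (Int × Int)) (x y : Int) (h0 : pvMd H x y = 0) :
    (x, y) ∈ H := by
  rcases pvMd_cases H x y with h1 | ⟨h, hm, he⟩
  · rw [h1] at h0; norm_num [pvInf] at h0
  · have : (x, y) = h := by
      have := he ▸ h0
      unfold pvDist at this
      have e1 : x = h.1 ∧ y = h.2 := by constructor <;> omega
      exact Prod.ext e1.1 e1.2
    rwa [this]

theorem pvMd_bound (n m : Int) (H : List (Int × Int)) (x y : Int)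
    (Hmem : ∀ h ∈ H, Blk n m h.1 h.2) (hn : n ≤ 1004) (hm : m ≤ 1004)
    (hb : Blk n m x y) (hlt : pvMd H x y < pvInf) : pvMd H x y ≤ 2006 := by
  rcases pvMd_cases H x y with h1 | ⟨h, hmem, he⟩
  · omega
  · have hbh := Hmem h hmem
    have : pvDist (x, y) h ≤ 2006 := by unfold pvDist; simp only at *; omega
    omega

theorem pvNbrs_symm (c c' : Int × Int) (h : c' ∈ pvNbrs c) : c ∈ pvNbrs c' := by
  rcases c with ⟨a, b⟩; rcases c' with ⟨a', b'⟩
  simp only [pvNbrs, List.mem_cons, List.not_mem_nil, or_false, Prod.mk.injEq] at h ⊢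
  omega

theorem pvMd_step (n m : Int) (H : List (Int × Int)) (x y : Int)
    (Hmem : ∀ h ∈ H, Blk n m h.1 h.2)
    (hb : Blk n m x y) (h1 : 1 ≤ pvMd H x y) (h2 : pvMd H x y < pvInf) :
    ∃ c' ∈ pvNbrs (x, y), Blk n m c'.1 c'.2 ∧ pvMd H c'.1 c'.2 = pvMd H x y - 1 := by
  rcases pvMd_cases H x y with hc | ⟨h, hmem, he⟩
  · omega
  · rcases h with ⟨hx, hy⟩
    have hbh := Hmem (hx, hy) hmem
    simp only at hbh
    have hdd : pvDist (x, y) (hx, hy) = pvMd H x y := he.symm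
    unfold pvDist at hdd; simp only at hdd
    -- choose a unit step from (x, y) towards the attaining hotel (hx, hy)
    have step : ∃ c' ∈ pvNbrs (x, y), Blk n m c'.1 c'.2 ∧
        pvDist (c'.1, c'.2) (hx, hy) = pvMd H x y - 1 := by
      rcases lt_trichotomy x hx with hlt | heq | hgt
      · refine ⟨(x + 1, y), by simp [pvNbrs], ?_, ?_⟩
        · rcases hb with ⟨b1, b2, b3, b4⟩; rcases hbh with ⟨c1, c2, c3, c4⟩
          exact ⟨by omega, by omega, b3, b4⟩
        · unfold pvDist; simp only; omega
      · rcases lt_trichotomy y hy with hylt | hyeq | hygt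
        · refine ⟨(x, y + 1), by simp [pvNbrs], ?_, ?_⟩
          · rcases hb with ⟨b1, b2, b3, b4⟩; rcases hbh with ⟨c1, c2, c3, c4⟩
            exact ⟨b1, b2, by omega, by omega⟩
          · unfold pvDist; simp only; omega
        · exfalso; omega
        · refine ⟨(x, y - 1), by simp [pvNbrs], ?_, ?_⟩
          · rcases hb with ⟨b1, b2, b3, b4⟩; rcases hbh with ⟨c1, c2, c3, c4⟩
            exact ⟨b1, b2, by omega, by omega⟩
          · unfold pvDist; simp only; omega
      · refine ⟨(x - 1, y), by simp [pvNbrs], ?_, ?_⟩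
        · rcases hb with ⟨b1, b2, b3, b4⟩; rcases hbh with ⟨c1, c2, c3, c4⟩
          exact ⟨by omega, by omega, b3, b4⟩
        · unfold pvDist; simp only; omega
    rcases step with ⟨c', hcm, hcb, hcd⟩
    refine ⟨c', hcm, hcb, le_antisymm ?_ ?_⟩
    · calc pvMd H c'.1 c'.2 ≤ pvDist (c'.1, c'.2) (hx, hy) := pvMd_le_dist _ _ _ _ hmem
        _ = pvMd H x y - 1 := hcd
    · have hl := pvMd_lipschitz H x y c'.1 c'.2
      have hone : pvDist (x, y) (c'.1, c'.2) = 1 := by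
        rcases c' with ⟨a', b'⟩
        simp only [pvNbrs, List.mem_cons, List.not_mem_nil, or_false, Prod.mk.injEq] at hcm
        unfold pvDist; simp only; omega
      omega



-- ===== fold characterisations of the two table-building loops =====

def pvVal (A : List (List Int)) (i j : Int) : Int := if pvAij A i j = 0 then pvInf else 0

def pvHotF (g : Int → Int → Int × Int) (A : List (List Int)) (n m : Int) : List (Int × Int) :=
  (PySem.List.pyRange 0 n 1).foldl (fun hs i =>
    (PySem.List.pyRange 0 m 1).foldl (fun hs j =>
      if pvAij A i j ≠ 0 then hs ++ [g i j] else hs) hs) []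

theorem pvSet_apply (f : Int → Int → Int) (x y v a b : Int) :
    pvSet f x y v a b = if a = x ∧ b = y then v else f a b := rfl

theorem pvSetRow (v : Int → Int) (i : Int) (k : Nat) (f : Int → Int → Int) (x y : Int) :
    ((PySem.List.pyRange 0 (k : Int) 1).foldl (fun f j => pvSet f (i + 1) (j + 1) (v j)) f) x y
      = if x = i + 1 ∧ 1 ≤ y ∧ y ≤ (k : Int) then v (y - 1) else f x y := by
  induction k with
  | zero =>
    rw [show ((0 : Nat) : Int) = 0 by rfl, PySem.List.pyRange_one_eq_nil le_rfl]
    simp only [List.foldl_nil]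
    rw [if_neg (by omega)]
  | succ k ih =>
    rw [show ((k + 1 : Nat) : Int) = (k : Int) + 1 by push_cast; ring,
      PySem.List.pyRange_one_succ_right (by positivity), List.foldl_append]
    simp only [List.foldl_cons, List.foldl_nil]
    rw [pvSet_apply, ih]
    by_cases h1 : x = i + 1 ∧ y = (k : Int) + 1
    · rw [if_pos h1, if_pos ⟨h1.1, by omega, by omega⟩]
      have : (k : Int) = y - 1 := by omega
      rw [this]
    · rw [if_neg h1]
      split_ifs with h2 h3 h3 <;> first | rfl | omega
  
theorem pvSetTable (v : Int → Int → Int) (n m : Nat) (f : Int → Int → Int) (x y : Int) :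
    pvTabF v (n : Int) (m : Int) f x y
      = if 1 ≤ x ∧ x ≤ (n : Int) ∧ 1 ≤ y ∧ y ≤ (m : Int) then v (x - 1) (y - 1) else f x y := by
  induction n with
  | zero =>
    unfold pvTabF
    rw [show ((0 : Nat) : Int) = 0 by rfl, PySem.List.pyRange_one_eq_nil le_rfl]
    simp only [List.foldl_nil]
    rw [if_neg (by omega)]
  | succ n ih =>
    unfold pvTabF at *
    rw [show ((n + 1 : Nat) : Int) = (n : Int) + 1 by push_cast; ring,
      PySem.List.pyRange_one_succ_right (by positivity), List.foldl_append]
    simp only [List.foldl_cons, List.foldl_nil]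
    rw [pvSetRow (fun j => v (n : Int) j), ih]
    by_cases h1 : x = (n : Int) + 1 ∧ 1 ≤ y ∧ y ≤ (m : Int)
    · rw [if_pos h1, if_pos ⟨by omega, by omega, h1.2.1, h1.2.2⟩]
      have : (n : Int) = x - 1 := by omega
      rw [this]
    · rw [if_neg h1]
      split_ifs with h2 h3 h3 <;> first | rfl | omega

theorem pvHotRow (A : List (List Int)) (g : Int → Int → Int × Int) (i : Int) (k : Nat)
    (hs : List (Int × Int)) :
    (PySem.List.pyRange 0 (k : Int) 1).foldl (fun hs j =>
        if pvAij A i j ≠ 0 then hs ++ [g i j] else hs) hs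
      = hs ++ ((PySem.List.pyRange 0 (k : Int) 1).filter
          (fun j => decide (pvAij A i j ≠ 0))).map (g i) := by
  induction k generalizing hs with
  | zero =>
    rw [show ((0 : Nat) : Int) = 0 by rfl, PySem.List.pyRange_one_eq_nil le_rfl]
    simp
  | succ k ih =>
    rw [show ((k + 1 : Nat) : Int) = (k : Int) + 1 by push_cast; ring,
      PySem.List.pyRange_one_succ_right (by positivity), List.foldl_append,
      List.filter_append, List.map_append, ih]
    simp only [List.foldl_cons, List.foldl_nil, List.filter_cons, List.filter_nil]
    by_cases h : pvAij A i (k : Int) ≠ 0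
    · rw [if_pos h]; simp [h]
    · rw [if_neg h]; simp [h]

theorem pvHotTable (A : List (List Int)) (g : Int → Int → Int × Int) (n m : Nat) :
    pvHotF g A (n : Int) (m : Int)
      = (PySem.List.pyRange 0 (n : Int) 1).flatMap (fun i =>
          ((PySem.List.pyRange 0 (m : Int) 1).filter
            (fun j => decide (pvAij A i j ≠ 0))).map (g i)) := by
  unfold pvHotF
  have hstep : (fun (hs : List (Int × Int)) (i : Int) =>
      (PySem.List.pyRange 0 (m : Int) 1).foldl (fun hs j =>
        if pvAij A i j ≠ 0 then hs ++ [g i j] else hs) hs)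
      = (fun hs i => hs ++ ((PySem.List.pyRange 0 (m : Int) 1).filter
          (fun j => decide (pvAij A i j ≠ 0))).map (g i)) := by
    funext hs i; exact pvHotRow A g i m hs
  rw [hstep, PySem.List.foldl_append_eq_flatMap]
  simp

theorem mem_pvHotF (A : List (List Int)) (n m : Nat) (c : Int × Int) :
    c ∈ pvHotF (fun i j => (i + 1, j + 1)) A (n : Int) (m : Int)
      ↔ (1 ≤ c.1 ∧ c.1 ≤ (n : Int) ∧ 1 ≤ c.2 ∧ c.2 ≤ (m : Int)
          ∧ pvAij A (c.1 - 1) (c.2 - 1) ≠ 0) := by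
  rw [pvHotTable]
  simp only [List.mem_flatMap, List.mem_map, List.mem_filter, PySem.List.mem_pyRange_one,
    decide_eq_true_eq]
  constructor
  · rintro ⟨i, ⟨hi0, hin⟩, j, ⟨⟨hj0, hjm⟩, hne⟩, rfl⟩
    simp only
    exact ⟨by omega, by omega, by omega, by omega, by simpa using hne⟩
  · rintro ⟨h1, h2, h3, h4, h5⟩
    exact ⟨c.1 - 1, ⟨by omega, by omega⟩, c.2 - 1, ⟨⟨by omega, by omega⟩, h5⟩,
      by rcases c with ⟨a, b⟩; simp only [Prod.mk.injEq]; omega⟩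

theorem length_pvHotF (A : List (List Int)) (g : Int → Int → Int × Int) (n m : Nat) :
    (pvHotF g A (n : Int) (m : Int)).length ≤ n * m := by
  rw [pvHotTable, List.length_flatMap]
  have hb : ∀ x ∈ ((PySem.List.pyRange 0 (n : Int) 1).map (fun i =>
      (((PySem.List.pyRange 0 (m : Int) 1).filter
        (fun j => decide (pvAij A i j ≠ 0))).map (g i)).length)), x ≤ m := by
    intro x hx
    simp only [List.mem_map] at hx
    rcases hx with ⟨i, _, rfl⟩
    calc _ = ((PySem.List.pyRange 0 (m : Int) 1).filter _).length := List.length_map ..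
      _ ≤ (PySem.List.pyRange 0 (m : Int) 1).length := List.length_filter_le _ _
      _ = m := by rw [PySem.List.length_pyRange_one]; omega
  calc _ ≤ _ • m := List.sum_le_card_nsmul _ m hb
    _ ≤ n * m := by
        rw [List.length_map, PySem.List.length_pyRange_one, smul_eq_mul]
        have : ((n : Int) - 0).toNat = n := by omega
        rw [this]

theorem pvHotF_shift (A : List (List Int)) (n m : Nat) :
    pvHotF (fun i j => (i + 1, j + 1)) A (n : Int) (m : Int)
      = (pvHotF (fun i j => (i, j)) A (n : Int) (m : Int)).map (fun c => (c.1 + 1, c.2 + 1)) := by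
  rw [pvHotTable, pvHotTable, List.map_flatMap]
  simp only [List.map_map]
  rfl

-- A's initialisation produces the hotel-or-inf block table and the (1-based) hotel list
theorem pvInitA_eq (A : List (List Int)) (n m : Int) :
    pvInitA A n m = (pvTabF (pvVal A) n m (fun _ _ => 0), pvHotF (fun i j => (i + 1, j + 1)) A n m) := by
  unfold pvInitA
  have istep : ∀ i : Int, (fun (s : (Int → Int → Int) × List (Int × Int)) (j : Int) =>
      if pvAij A i j = 0 then (pvSet s.1 (i + 1) (j + 1) pvInf, s.2)
      else (pvSet s.1 (i + 1) (j + 1) 0, s.2 ++ [(i + 1, j + 1)]))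
      = (fun s j => (pvSet s.1 (i + 1) (j + 1) (pvVal A i j),
          if pvAij A i j ≠ 0 then s.2 ++ [(i + 1, j + 1)] else s.2)) := by
    intro i; funext s j
    by_cases h : pvAij A i j = 0 <;> simp [h, pvVal]
  have ostep : (fun (s : (Int → Int → Int) × List (Int × Int)) (i : Int) =>
      (PySem.List.pyRange 0 m 1).foldl (fun s j =>
        if pvAij A i j = 0 then (pvSet s.1 (i + 1) (j + 1) pvInf, s.2)
        else (pvSet s.1 (i + 1) (j + 1) 0, s.2 ++ [(i + 1, j + 1)])) s)
      = (fun s i =>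
          ((PySem.List.pyRange 0 m 1).foldl (fun f j => pvSet f (i + 1) (j + 1) (pvVal A i j)) s.1,
           (PySem.List.pyRange 0 m 1).foldl (fun hs j =>
             if pvAij A i j ≠ 0 then hs ++ [(i + 1, j + 1)] else hs) s.2)) := by
    funext s i
    rcases s with ⟨a, b⟩
    rw [istep i]
    exact PySem.List.foldl_prod_mk
      (f := fun f j => pvSet f (i + 1) (j + 1) (pvVal A i j))
      (g := fun hs j => if pvAij A i j ≠ 0 then hs ++ [(i + 1, j + 1)] else hs) _ a b
  rw [ostep]
  unfold pvTabF pvHotF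
  exact PySem.List.foldl_prod_mk
    (f := fun f i => (PySem.List.pyRange 0 m 1).foldl (fun f j => pvSet f (i + 1) (j + 1) (pvVal A i j)) f)
    (g := fun hs i => (PySem.List.pyRange 0 m 1).foldl (fun hs j => if pvAij A i j ≠ 0 then hs ++ [(i + 1, j + 1)] else hs) hs)
    _ _ _

-- Source B's inner best-loop computes the nearest-hotel distance of the shifted hotel list
theorem pvBest_eq (A : List (List Int)) (n m : Nat) (i j : Int) :
    pvBest (pvHotF (fun i j => (i, j)) A (n : Int) (m : Int)) i j
      = pvMd (pvHotF (fun i j => (i + 1, j + 1)) A (n : Int) (m : Int)) (i + 1) (j + 1) := by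
  rw [pvHotF_shift]
  unfold pvBest pvMd
  rw [List.foldl_map]
  have hstep : (fun (best : Int) (h : Int × Int) =>
      let d : Int := (((i - h.1).natAbs + (j - h.2).natAbs : Nat) : Int)
      if d < best then d else best)
      = (fun best h => min best (pvDist (i + 1, j + 1) ((fun c : Int × Int => (c.1 + 1, c.2 + 1)) h))) := by
    funext best h
    simp only [pvDist, min_def]
    have e1 : i + 1 - (h.1 + 1) = i - h.1 := by ring
    have e2 : j + 1 - (h.2 + 1) = j - h.2 := by ring
    rw [e1, e2]
    simp only [Nat.cast_add]
    split_ifs <;> omega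
  rw [hstep]



-- ===== the BFS invariant and its preservation =====

theorem pvNbrs_ne (c c' : Int × Int) (h : c' ∈ pvNbrs c) : c' ≠ c := by
  rcases c with ⟨a, b⟩; rcases c' with ⟨a', b'⟩
  simp only [pvNbrs, List.mem_cons, List.not_mem_nil, or_false, Prod.mk.injEq] at h
  simp only [ne_eq, Prod.mk.injEq]
  omega

theorem pvDist_nbr (c c' : Int × Int) (h : c' ∈ pvNbrs c) :
    pvDist (c'.1, c'.2) (c.1, c.2) = 1 := by
  rcases c with ⟨a, b⟩; rcases c' with ⟨a', b'⟩
  simp only [pvNbrs, List.mem_cons, List.not_mem_nil, or_false, Prod.mk.injEq] at h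
  unfold pvDist; simp only; omega

def pvCells (n m : Int) : List (Int × Int) :=
  (PySem.List.pyRange 1 (n + 1) 1).flatMap (fun x =>
    (PySem.List.pyRange 1 (m + 1) 1).map (fun y => (x, y)))

theorem mem_pvCells (n m : Int) (c : Int × Int) :
    c ∈ pvCells n m ↔ Blk n m c.1 c.2 := by
  rcases c with ⟨x, y⟩
  simp only [pvCells, List.mem_flatMap, List.mem_map, PySem.List.mem_pyRange_one,
    Prod.mk.injEq]
  constructor
  · rintro ⟨a, ⟨h1, h2⟩, b, ⟨h3, h4⟩, rfl, rfl⟩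
    exact ⟨h1, by omega, h3, by omega⟩
  · rintro ⟨h1, h2, h3, h4⟩
    exact ⟨x, ⟨h1, by omega⟩, y, ⟨h3, by omega⟩, rfl, rfl⟩

theorem length_pvCells (n m : Nat) : (pvCells (n : Int) (m : Int)).length = n * m := by
  rw [pvCells, List.length_flatMap]
  have : ((PySem.List.pyRange 1 ((n : Int) + 1) 1).map (fun x =>
      ((PySem.List.pyRange 1 ((m : Int) + 1) 1).map (fun y => (x, y))).length))
      = (PySem.List.pyRange 1 ((n : Int) + 1) 1).map (fun _ => m) := by
    apply List.map_congr_left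
    intro a _
    rw [List.length_map, PySem.List.length_pyRange_one]
    omega
  rw [this]
  have h2 : ∀ (l : List Int), (l.map (fun _ => m)).sum = l.length * m := by
    intro l
    induction l with
    | nil => simp
    | cons a t ih => simp [Nat.succ_mul]; omega
  rw [h2, PySem.List.length_pyRange_one]
  have : ((n : Int) + 1 - 1).toNat = n := by omega
  rw [this]

def pvMu (n m : Int) (dis : Int → Int → Int) (q : List (Int × Int)) : Nat :=
  (pvCells n m).countP (fun c => dis c.1 c.2 == pvInf) + q.length

structure BfsInv (n m : Int) (H : List (Int × Int)) (dis : Int → Int → Int)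
    (q : List (Int × Int)) : Prop where
  outz : ∀ x y, ¬ Blk n m x y → dis x y = 0
  setv : ∀ x y, Blk n m x y → dis x y = pvInf ∨ dis x y = pvMd H x y
  hotset : ∀ c ∈ H, dis c.1 c.2 = pvMd H c.1 c.2
  qmem : ∀ c ∈ q, Blk n m c.1 c.2 ∧ dis c.1 c.2 = pvMd H c.1 c.2 ∧ pvMd H c.1 c.2 < pvInf
  front : ∀ x y, Blk n m x y → dis x y ≠ pvInf →
    (x, y) ∈ q ∨ ∀ c ∈ pvNbrs (x, y), Blk n m c.1 c.2 → dis c.1 c.2 ≠ pvInf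
  mono : q.Pairwise (fun a b => pvMd H a.1 a.2 ≤ pvMd H b.1 b.2 ∧ pvMd H b.1 b.2 ≤ pvMd H a.1 a.2 + 1)
  settled : ∀ c₀ ∈ q.head?, ∀ x y, Blk n m x y → pvMd H x y ≤ pvMd H c₀.1 c₀.2 → dis x y ≠ pvInf

structure MidInv (n m : Int) (H : List (Int × Int)) (curr : Int × Int) (k : Int)
    (rem : List (Int × Int)) (dis : Int → Int → Int) (q : List (Int × Int)) : Prop where
  outz : ∀ x y, ¬ Blk n m x y → dis x y = 0
  setv : ∀ x y, Blk n m x y → dis x y = pvInf ∨ dis x y = pvMd H x y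
  hotset : ∀ c ∈ H, dis c.1 c.2 = pvMd H c.1 c.2
  qmem : ∀ c ∈ q, Blk n m c.1 c.2 ∧ dis c.1 c.2 = pvMd H c.1 c.2
    ∧ k ≤ pvMd H c.1 c.2 ∧ pvMd H c.1 c.2 ≤ k + 1
  front : ∀ x y, Blk n m x y → dis x y ≠ pvInf →
    ((x, y) ∈ q ∨ (x, y) = curr ∨ ∀ c ∈ pvNbrs (x, y), Blk n m c.1 c.2 → dis c.1 c.2 ≠ pvInf)
  mono : q.Pairwise (fun a b => pvMd H a.1 a.2 ≤ pvMd H b.1 b.2 ∧ pvMd H b.1 b.2 ≤ pvMd H a.1 a.2 + 1)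
  settled : ∀ x y, Blk n m x y → pvMd H x y ≤ k → dis x y ≠ pvInf
  remc : ∀ c ∈ pvNbrs curr, Blk n m c.1 c.2 → dis c.1 c.2 = pvInf → c ∈ rem
  currk : Blk n m curr.1 curr.2 ∧ dis curr.1 curr.2 = k ∧ pvMd H curr.1 curr.2 = k

theorem pvInf_eq : pvInf = 1073741824 := rfl

theorem midStep (n m : Int) (H : List (Int × Int)) (curr nb : Int × Int) (k : Int)
    (rem : List (Int × Int)) (dis : Int → Int → Int) (q : List (Int × Int))
    (hk2 : k + 1 < pvInf)
    (hnb : nb ∈ pvNbrs curr)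
    (J : MidInv n m H curr k (nb :: rem) dis q) :
    MidInv n m H curr k rem (pvRelax curr (dis, q) nb).1 (pvRelax curr (dis, q) nb).2
      ∧ pvMu n m (pvRelax curr (dis, q) nb).1 (pvRelax curr (dis, q) nb).2 ≤ pvMu n m dis q := by
  by_cases hinf : dis nb.1 nb.2 = pvInf
  · have hblknb : Blk n m nb.1 nb.2 := by
      by_contra hnot
      have := J.outz nb.1 nb.2 hnot
      rw [this] at hinf
      rw [pvInf_eq] at hinf
      omega
    have hMle : pvMd H nb.1 nb.2 ≤ k + 1 := by
      have hl := pvMd_lipschitz H nb.1 nb.2 curr.1 curr.2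
      have hd := pvDist_nbr curr nb hnb
      rw [J.currk.2.2] at hl
      omega
    have hMgt : k + 1 ≤ pvMd H nb.1 nb.2 := by
      by_contra hle
      exact (J.settled nb.1 nb.2 hblknb (by omega)) hinf
    have hMeq : pvMd H nb.1 nb.2 = k + 1 := le_antisymm hMle hMgt
    have hval : dis curr.1 curr.2 + 1 = k + 1 := by rw [J.currk.2.1]
    have hrel : pvRelax curr (dis, q) nb
        = (pvSet dis nb.1 nb.2 (k + 1), q ++ [nb]) := by
      unfold pvRelax
      dsimp only
      rw [if_pos hinf, hval]
    rw [hrel]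
    change MidInv n m H curr k rem (pvSet dis nb.1 nb.2 (k + 1)) (q ++ [nb]) ∧
      pvMu n m (pvSet dis nb.1 nb.2 (k + 1)) (q ++ [nb]) ≤ pvMu n m dis q
    -- the updated table: `inf` entries only shrink, and nb now carries its true distance
    have hpres : ∀ a b : Int, pvSet dis nb.1 nb.2 (k + 1) a b = pvInf → dis a b = pvInf := by
      intro a b h
      rw [pvSet_apply] at h
      split_ifs at h with hc
      · omega
      · exact h
    have hnewv : pvSet dis nb.1 nb.2 (k + 1) nb.1 nb.2 = k + 1 := by
      rw [pvSet_apply, if_pos ⟨rfl, rfl⟩]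
    refine ⟨⟨?_, ?_, ?_, ?_, ?_, ?_, ?_, ?_, ?_⟩, ?_⟩
    · intro x y hb
      rw [pvSet_apply]
      split_ifs with hc
      · exfalso; rcases hc with ⟨rfl, rfl⟩; exact hb hblknb
      · exact J.outz x y hb
    · intro x y hb
      rw [pvSet_apply]
      split_ifs with hc
      · right; rcases hc with ⟨rfl, rfl⟩; omega
      · exact J.setv x y hb
    · intro c hc
      rw [pvSet_apply]
      split_ifs with h1
      · rcases h1 with ⟨e1, e2⟩; rw [← e1, ← e2] at hMeq; omega
      · exact J.hotset c hc
    · intro c hc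
      rw [List.mem_append] at hc
      rcases hc with hc | hc
      · obtain ⟨hb, he, h1, h2⟩ := J.qmem c hc
        refine ⟨hb, ?_, h1, h2⟩
        rw [pvSet_apply]
        split_ifs with hcc
        · exfalso; rcases hcc with ⟨e1, e2⟩; rw [← e1, ← e2] at hinf; omega
        · exact he
      · simp only [List.mem_singleton] at hc
        subst hc
        exact ⟨hblknb, by rw [hnewv, hMeq], by omega, by omega⟩
    · intro x y hb hne
      rw [pvSet_apply] at hne
      by_cases hc : x = nb.1 ∧ y = nb.2
      · left
        rcases hc with ⟨rfl, rfl⟩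
        simp
      · rw [if_neg hc] at hne
        rcases J.front x y hb hne with h | h | h
        · left; exact List.mem_append_left _ h
        · right; left; exact h
        · right; right
          intro c hcm hcb
          exact fun hh => h c hcm hcb (hpres _ _ hh)
    · rw [List.pairwise_append]
      refine ⟨J.mono, by simp, ?_⟩
      intro a ha b hb
      simp only [List.mem_singleton] at hb
      subst hb
      obtain ⟨_, _, h1, h2⟩ := J.qmem a ha
      rw [hMeq]
      omega
    · intro x y hb hle
      exact fun hh => (J.settled x y hb hle) (hpres _ _ hh)
    · intro c hcm hcb hcinf
      have hcd : dis c.1 c.2 = pvInf := hpres _ _ hcinf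
      have := J.remc c hcm hcb hcd
      rcases List.mem_cons.1 this with h | h
      · exfalso
        subst h
        rw [hnewv] at hcinf
        omega
      · exact h
    · refine ⟨J.currk.1, ?_, J.currk.2.2⟩
      rw [pvSet_apply]
      split_ifs with hc
      · exfalso
        have := pvNbrs_ne curr nb hnb
        rcases curr with ⟨a, b⟩; rcases nb with ⟨a', b'⟩
        simp only at hc
        simp only [ne_eq, Prod.mk.injEq] at this
        omega
      · exact J.currk.2.1
    · -- the measure does not grow: q gains one element, one `inf` cell becomes finite
      unfold pvMu
      have hcnt : (pvCells n m).countP (fun c => pvSet dis nb.1 nb.2 (k + 1) c.1 c.2 == pvInf)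
          < (pvCells n m).countP (fun c => dis c.1 c.2 == pvInf) := by
        have hmem : nb ∈ pvCells n m := (mem_pvCells n m nb).2 hblknb
        have key : ∀ L : List (Int × Int), nb ∈ L →
            L.countP (fun c => pvSet dis nb.1 nb.2 (k + 1) c.1 c.2 == pvInf)
              < L.countP (fun c => dis c.1 c.2 == pvInf) := by
          intro L hmem
          induction L with
          | nil => simp at hmem
          | cons c t ih =>
            rcases List.mem_cons.1 hmem with hc | hc
            · subst hc
              simp only [List.countP_cons]
              have h1 : (pvSet dis nb.1 nb.2 (k + 1) nb.1 nb.2 == pvInf) = false := by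
                rw [hnewv]; simp; omega
              have h2 : (dis nb.1 nb.2 == pvInf) = true := by simp [hinf]
              have hmono : t.countP (fun c => pvSet dis nb.1 nb.2 (k + 1) c.1 c.2 == pvInf)
                  ≤ t.countP (fun c => dis c.1 c.2 == pvInf) := by
                apply List.countP_mono_left
                intro a _ hpa
                simp only [beq_iff_eq] at hpa ⊢
                exact hpres _ _ hpa
              simp only [h1, h2, if_true, if_false, Bool.false_eq_true]
              omega
            · have ihh := ih hc
              simp only [List.countP_cons]
              have hhead : ((pvSet dis nb.1 nb.2 (k + 1) c.1 c.2 == pvInf) : Bool) = true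
                  → ((dis c.1 c.2 == pvInf) : Bool) = true := by
                intro hh
                simp only [beq_iff_eq] at hh ⊢
                exact hpres _ _ hh
              cases h1 : (pvSet dis nb.1 nb.2 (k + 1) c.1 c.2 == pvInf) <;>
                cases h2 : (dis c.1 c.2 == pvInf) <;> simp_all <;> omega
        exact key _ hmem
      simp only [List.length_append, List.length_singleton]
      omega
  · have hrel : pvRelax curr (dis, q) nb = (dis, q) := by
      unfold pvRelax
      rw [if_neg hinf]
    rw [hrel]
    refine ⟨⟨J.outz, J.setv, J.hotset, ?_, ?_, J.mono, J.settled, ?_, J.currk⟩, le_rfl⟩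
    · intro c hc; exact J.qmem c hc
    · intro x y hb hne
      exact J.front x y hb hne
    · intro c hcm hcb hcd
      rcases List.mem_cons.1 (J.remc c hcm hcb hcd) with h | h
      · exfalso; subst h; exact hinf hcd
      · exact h


theorem midFold (n m : Int) (H : List (Int × Int)) (curr : Int × Int) (k : Int)
    (hk2 : k + 1 < pvInf) :
    ∀ (rem : List (Int × Int)) (dis : Int → Int → Int) (q : List (Int × Int)),
      (∀ c ∈ rem, c ∈ pvNbrs curr) →
      MidInv n m H curr k rem dis q →
      MidInv n m H curr k [] (rem.foldl (pvRelax curr) (dis, q)).1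
          (rem.foldl (pvRelax curr) (dis, q)).2
        ∧ pvMu n m (rem.foldl (pvRelax curr) (dis, q)).1
            (rem.foldl (pvRelax curr) (dis, q)).2 ≤ pvMu n m dis q := by
  intro rem
  induction rem with
  | nil => intro dis q _ J; exact ⟨J, le_rfl⟩
  | cons nb rem ih =>
    intro dis q hsub J
    have hstep := midStep n m H curr nb k rem dis q hk2
      (hsub nb (by simp)) J
    rcases hp : pvRelax curr (dis, q) nb with ⟨d2, q2⟩
    rw [hp] at hstep
    have hih := ih d2 q2 (fun c hc => hsub c (by simp [hc])) hstep.1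
    simp only [List.foldl_cons, hp]
    exact ⟨hih.1, le_trans hih.2 hstep.2⟩

theorem bfsPop (n m : Int) (H : List (Int × Int))
    (Hmem : ∀ h ∈ H, Blk n m h.1 h.2) (hn : n ≤ 1004) (hm : m ≤ 1004)
    (curr : Int × Int) (rest : List (Int × Int)) (dis : Int → Int → Int)
    (hInv : BfsInv n m H dis (curr :: rest)) :
    BfsInv n m H ((pvNbrs curr).foldl (pvRelax curr) (dis, rest)).1
        ((pvNbrs curr).foldl (pvRelax curr) (dis, rest)).2
      ∧ pvMu n m ((pvNbrs curr).foldl (pvRelax curr) (dis, rest)).1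
          ((pvNbrs curr).foldl (pvRelax curr) (dis, rest)).2
        < pvMu n m dis (curr :: rest) := by
  obtain ⟨hbc, hdc, hkinf⟩ := hInv.qmem curr (by simp)
  have hk2 : pvMd H curr.1 curr.2 + 1 < pvInf := by
    have := pvMd_bound n m H curr.1 curr.2 Hmem hn hm hbc hkinf
    rw [pvInf_eq] at *
    omega
  have hmono := List.pairwise_cons.1 hInv.mono
  have J0 : MidInv n m H curr (pvMd H curr.1 curr.2) (pvNbrs curr) dis rest := by
    refine ⟨hInv.outz, hInv.setv, hInv.hotset, ?_, ?_, hmono.2, ?_, ?_, hbc, hdc, rfl⟩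
    · intro c hc
      obtain ⟨hb, he, _⟩ := hInv.qmem c (by simp [hc])
      obtain ⟨h1, h2⟩ := hmono.1 c hc
      exact ⟨hb, he, h1, h2⟩
    · intro x y hb hne
      rcases hInv.front x y hb hne with h | h
      · rcases List.mem_cons.1 h with h | h
        · right; left; exact h
        · left; exact h
      · right; right; exact h
    · intro x y hb hle
      exact hInv.settled curr (by simp) x y hb hle
    · intro c hcm _ _
      exact hcm
  have hfold := midFold n m H curr (pvMd H curr.1 curr.2) hk2 (pvNbrs curr) dis rest
    (fun c hc => hc) J0
  set s := (pvNbrs curr).foldl (pvRelax curr) (dis, rest) with hs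
  obtain ⟨Jend, hμ⟩ := hfold
  constructor
  · refine ⟨Jend.outz, Jend.setv, Jend.hotset, ?_, ?_, Jend.mono, ?_⟩
    · intro c hc
      obtain ⟨hb, he, _, hi⟩ := Jend.qmem c hc
      exact ⟨hb, he, lt_of_le_of_lt hi hk2⟩
    · intro x y hb hne
      rcases Jend.front x y hb hne with h | h | h
      · left; exact h
      · right
        intro c hcm hcb
        intro hcd
        have : c ∈ ([] : List (Int × Int)) := by
          apply Jend.remc c _ hcb hcd
          rw [← h]
          exact hcm
        simp at this
      · right; exact h
    · intro c₀ hc₀ x y hb hle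
      have hc₀mem : c₀ ∈ s.2 := List.mem_of_mem_head? hc₀
      obtain ⟨_, _, hlo, hhi⟩ := Jend.qmem c₀ hc₀mem
      by_cases hxy : pvMd H x y ≤ pvMd H curr.1 curr.2
      · exact Jend.settled x y hb hxy
      · push_neg at hxy
        have hxe : pvMd H x y = pvMd H curr.1 curr.2 + 1 := by omega
        have hk0 := pvMd_nonneg H curr.1 curr.2
        obtain ⟨v, hvm, hvb, hveq⟩ := pvMd_step n m H x y Hmem hb (by omega) (by omega)
        have hvset : s.1 v.1 v.2 ≠ pvInf := Jend.settled v.1 v.2 hvb (by omega)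
        rcases Jend.front v.1 v.2 hvb hvset with hq | hcurr | hclosed
        · exfalso
          have hmono2 := Jend.mono
          cases hq' : s.2 with
          | nil => rw [hq'] at hq; simp at hq
          | cons a tail =>
            rw [hq'] at hq hc₀ hmono2
            simp only [List.head?_cons, Option.mem_def, Option.some.injEq] at hc₀
            rcases List.mem_cons.1 hq with he | he
            · have : pvMd H c₀.1 c₀.2 = pvMd H v.1 v.2 := by rw [← hc₀, ← he]
              omega
            · have := (List.pairwise_cons.1 hmono2).1 (v.1, v.2) he
              rw [hc₀] at this
              simp only at this
              omega
        · have hvcurr : v = curr := by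
            have he : (v.1, v.2) = v := rfl
            rw [← he]; exact hcurr
          have hxymem : (x, y) ∈ pvNbrs curr := hvcurr ▸ pvNbrs_symm (x, y) v hvm
          intro hdd
          have : (x, y) ∈ ([] : List (Int × Int)) := Jend.remc (x, y) hxymem hb hdd
          simp at this
        · exact hclosed (x, y) (pvNbrs_symm (x, y) v hvm) hb
  · have : pvMu n m dis (curr :: rest) = pvMu n m dis rest + 1 := by
      unfold pvMu
      simp [List.length_cons]
      omega
    omega


theorem bfsDone (n m : Int) (H : List (Int × Int))
    (Hmem : ∀ h ∈ H, Blk n m h.1 h.2) (dis : Int → Int → Int)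
    (hInv : BfsInv n m H dis []) :
    ∀ x y, Blk n m x y → dis x y = pvMd H x y := by
  have aux : ∀ (K : Nat) (x y : Int), Blk n m x y → pvMd H x y = (K : Int) →
      pvMd H x y < pvInf → dis x y ≠ pvInf := by
    intro K
    induction K with
    | zero =>
      intro x y hb he _
      have hmem : (x, y) ∈ H := pvMd_zero_mem H x y (by exact_mod_cast he)
      have := hInv.hotset (x, y) hmem
      simp only at this
      rw [this, he]
      rw [pvInf_eq]
      omega
    | succ K ih =>
      intro x y hb he hlt
      have h1 : 1 ≤ pvMd H x y := by rw [he]; push_cast; omega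
      obtain ⟨v, hvm, hvb, hveq⟩ := pvMd_step n m H x y Hmem hb h1 hlt
      have hvK : pvMd H v.1 v.2 = (K : Int) := by rw [hveq, he]; push_cast; ring
      have hvlt : pvMd H v.1 v.2 < pvInf := by omega
      have hvset : dis v.1 v.2 ≠ pvInf := ih v.1 v.2 hvb hvK hvlt
      rcases hInv.front v.1 v.2 hvb hvset with hq | hclosed
      · simp at hq
      · exact hclosed (x, y) (pvNbrs_symm (x, y) v hvm) hb
  intro x y hb
  rcases hInv.setv x y hb with h | h
  · rcases lt_or_eq_of_le (pvMd_le_inf H x y) with hlt | heq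
    · exfalso
      have h0 := pvMd_nonneg H x y
      exact aux (pvMd H x y).toNat x y hb (by omega) hlt h
    · rw [h, heq]
  · exact h

theorem bfsRun (n m : Int) (H : List (Int × Int))
    (Hmem : ∀ h ∈ H, Blk n m h.1 h.2) (hn : n ≤ 1004) (hm : m ≤ 1004) :
    ∀ (fuel : Nat) (dis : Int → Int → Int) (q : List (Int × Int)),
      BfsInv n m H dis q → pvMu n m dis q ≤ fuel →
      ∀ x y, pvBfs fuel dis q x y = if Blk n m x y then pvMd H x y else dis x y := by
  intro fuel
  induction fuel with
  | zero =>
    intro dis q hInv hmu x y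
    cases q with
    | nil =>
      show dis x y = _
      split_ifs with hb
      · exact bfsDone n m H Hmem dis hInv x y hb
      · rfl
    | cons curr rest =>
      exfalso
      unfold pvMu at hmu
      simp only [List.length_cons] at hmu
      omega
  | succ fuel ih =>
    intro dis q hInv hmu x y
    cases q with
    | nil =>
      show dis x y = _
      split_ifs with hb
      · exact bfsDone n m H Hmem dis hInv x y hb
      · rfl
    | cons curr rest =>
      obtain ⟨hInv2, hmu2⟩ := bfsPop n m H Hmem hn hm curr rest dis hInv
      have hrun := ih _ _ hInv2 (by omega) x y
      show pvBfs fuel ((pvNbrs curr).foldl (pvRelax curr) (dis, rest)).1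
          ((pvNbrs curr).foldl (pvRelax curr) (dis, rest)).2 x y = _
      rw [hrun]
      split_ifs with hb
      · rfl
      · rw [hInv2.outz x y hb, hInv.outz x y hb]


theorem pvHead_eq (A : List (List Int)) :
    (PySem.List.pyGet? A 0).getD [] = A.headD [] := by
  cases A with
  | nil => rfl
  | cons a t => rw [PySem.List.pyGet?_zero_cons]; rfl

theorem initInv (A : List (List Int)) (n m : Nat) :
    BfsInv (n : Int) (m : Int) (pvHotF (fun i j => (i + 1, j + 1)) A (n : Int) (m : Int))
      (pvTabF (pvVal A) (n : Int) (m : Int) (fun _ _ => 0))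
      (pvHotF (fun i j => (i + 1, j + 1)) A (n : Int) (m : Int)) := by
  have hmem := mem_pvHotF A n m
  have htab := pvSetTable (pvVal A) n m (fun _ _ => 0)
  have hhot : ∀ c ∈ pvHotF (fun i j => (i + 1, j + 1)) A (n : Int) (m : Int),
      pvTabF (pvVal A) (n : Int) (m : Int) (fun _ _ => 0) c.1 c.2 = 0 := by
    intro c hc
    obtain ⟨h1, h2, h3, h4, h5⟩ := (hmem c).1 hc
    rw [htab c.1 c.2, if_pos ⟨h1, h2, h3, h4⟩]
    unfold pvVal
    rw [if_neg h5]
  have hmd : ∀ c ∈ pvHotF (fun i j => (i + 1, j + 1)) A (n : Int) (m : Int),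
      pvMd (pvHotF (fun i j => (i + 1, j + 1)) A (n : Int) (m : Int)) c.1 c.2 = 0 :=
    fun c hc => pvMd_hot _ c hc
  refine ⟨?_, ?_, ?_, ?_, ?_, ?_, ?_⟩
  · intro x y hb
    rw [htab x y, if_neg hb]
  · intro x y hb
    rw [htab x y, if_pos hb]
    unfold pvVal
    by_cases h : pvAij A (x - 1) (y - 1) = 0
    · left; rw [if_pos h]
    · right
      rw [if_neg h]
      have hxm : (x, y) ∈ pvHotF (fun i j => (i + 1, j + 1)) A (n : Int) (m : Int) :=
        (hmem (x, y)).2 ⟨hb.1, hb.2.1, hb.2.2.1, hb.2.2.2, h⟩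
      exact (hmd _ hxm).symm
  · intro c hc
    rw [hhot c hc, hmd c hc]
  · intro c hc
    refine ⟨?_, ?_, ?_⟩
    · obtain ⟨h1, h2, h3, h4, _⟩ := (hmem c).1 hc
      exact ⟨h1, h2, h3, h4⟩
    · rw [hhot c hc, hmd c hc]
    · rw [hmd c hc, pvInf_eq]; omega
  · intro x y hb hne
    left
    rw [htab x y, if_pos hb] at hne
    unfold pvVal at hne
    by_cases h : pvAij A (x - 1) (y - 1) = 0
    · exfalso; rw [if_pos h] at hne; exact hne rfl
    · exact (hmem (x, y)).2 ⟨hb.1, hb.2.1, hb.2.2.1, hb.2.2.2, h⟩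
  · apply List.pairwise_of_forall_mem_list
    intro a ha b hb
    rw [hmd a ha, hmd b hb]
    omega
  · intro c₀ hc₀ x y hb hle
    have hc₀m := List.mem_of_mem_head? hc₀
    rw [hmd c₀ hc₀m] at hle
    have h0 := pvMd_nonneg (pvHotF (fun i j => (i + 1, j + 1)) A (n : Int) (m : Int)) x y
    have hz : pvMd (pvHotF (fun i j => (i + 1, j + 1)) A (n : Int) (m : Int)) x y = 0 := by omega
    have hxm := pvMd_zero_mem _ x y hz
    rw [hhot _ hxm]
    rw [pvInf_eq]
    omega

theorem initMu (A : List (List Int)) (n m : Nat) :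
    pvMu (n : Int) (m : Int) (pvTabF (pvVal A) (n : Int) (m : Int) (fun _ _ => 0))
      (pvHotF (fun i j => (i + 1, j + 1)) A (n : Int) (m : Int)) ≤ 2 * n * m := by
  unfold pvMu
  have h2 := length_pvHotF A (fun i j => (i + 1, j + 1)) n m
  refine le_trans (Nat.add_le_add List.countP_le_length h2) ?_
  rw [length_pvCells]
  have : 2 * n * m = n * m + n * m := by ring
  rw [this]

-- the two final tables agree everywhere
theorem tablesEq (A : List (List Int)) (n m : Nat) (hn : n ≤ 1004) (hm : m ≤ 1004) :
    ∀ x y : Int,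
      pvBfs (2 * n * m + 1) (pvInitA A (n : Int) (m : Int)).1 (pvInitA A (n : Int) (m : Int)).2 x y
        = pvTabF (fun i j => pvBest (pvHotels A (n : Int) (m : Int)) i j)
            (n : Int) (m : Int) (fun _ _ => 0) x y := by
  have hpe : pvHotels A (n : Int) (m : Int) = pvHotF (fun i j => (i, j)) A (n : Int) (m : Int) := rfl
  rw [hpe]
  intro x y
  have Hmem : ∀ h ∈ pvHotF (fun i j => (i + 1, j + 1)) A (n : Int) (m : Int),
      Blk (n : Int) (m : Int) h.1 h.2 := by
    intro h hh
    obtain ⟨h1, h2, h3, h4, _⟩ := (mem_pvHotF A n m h).1 hh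
    exact ⟨h1, h2, h3, h4⟩
  rw [pvInitA_eq]
  have hrun := bfsRun (n : Int) (m : Int) _ Hmem (by exact_mod_cast hn) (by exact_mod_cast hm)
    (2 * n * m + 1) _ _ (initInv A n m) (by have := initMu A n m; omega) x y
  rw [hrun, pvSetTable (fun i j => pvBest (pvHotF (fun i j => (i, j)) A (n : Int) (m : Int)) i j)
    n m (fun _ _ => 0) x y]
  split_ifs with hb
  · rw [pvBest_eq A n m (x - 1) (y - 1)]
    have e1 : x - 1 + 1 = x := by ring
    have e2 : y - 1 + 1 = y := by ring
    rw [e1, e2]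
  · rw [pvSetTable, if_neg hb]

-- ===== VERDICT (by name: the statement is the Claim_ definition above) =====
theorem nearestHotel2_spec : Claim_equal_nearestHotel2 := by
  intro A B hdom hpre
  obtain ⟨hA, hrows, hn1004, hm1004, hbig, hq⟩ := hpre
  unfold Spec_nearestHotel2 nearestHotel2 nearestHotel2_alt
  dsimp only
  rw [PySem.List.foldl_append_singleton_eq_map, List.nil_append]
  apply List.map_congr_left
  intro q _
  have hmlen : ((PySem.List.pyGet? A 0).getD []).length ≤ 1004 := by
    rw [pvHead_eq]; exact hm1004
  have key := tablesEq A A.length (((PySem.List.pyGet? A 0).getD []).length) hn1004 hmlen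
  simp only [Int.toNat_natCast]
  exact key _ _
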